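-- pv_equiv track=rewrite | github.com/Vridhi02Aggarwal/Algo_play_gamified_learning_platform | algorithms/graph.py | dfs_build_steps
-- ===== SOURCE A (Python) =====
-- def dfs_build_steps(graph, start):
--     visited = set()
--     steps = []
--     explanations = []
--
--     def dfs(node):
--         if node not in visited:
--             visited.add(node)
--             steps.append(node)
--             explanations.append(f"Visited {node}")
--             for neighbor in graph.get(node, []):
--                 if neighbor not in visited:
--                     explanations.append(f"From {node} → going to {neighbor}")
--                     dfs(neighbor)
--
--     dfs(start)
--     return steps, explanations
-- ===== SOURCE B (Python) =====
-- def dfs_build_steps(graph, start):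
--     visited = {start}
--     steps = [start]
--     explanations = [f"Visited {start}"]
--     stack = [(start, nb) for nb in reversed(graph.get(start, []))]
--     while stack:
--         frm, nb = stack.pop()
--         if nb in visited:
--             continue
--         explanations.append(f"From {frm} → going to {nb}")
--         visited.add(nb)
--         steps.append(nb)
--         explanations.append(f"Visited {nb}")
--         stack.extend((nb, m) for m in reversed(graph.get(nb, [])))
--     return steps, explanations
-- ===== Notes on version B (the rewrite author's own statement) =====
-- stated objective: alternative
-- what changed: Replaced A's recursive DFS (nested function recursing on each newly discovered neighbor) with an iterative DFS driven by an explicit stack of (from, to) edge tasks, popping one task at a time and pushing a visited node's neighbor tasks in reverse, which reproduces A's exact visit and explanation order without recursion.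
import Mathlib
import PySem

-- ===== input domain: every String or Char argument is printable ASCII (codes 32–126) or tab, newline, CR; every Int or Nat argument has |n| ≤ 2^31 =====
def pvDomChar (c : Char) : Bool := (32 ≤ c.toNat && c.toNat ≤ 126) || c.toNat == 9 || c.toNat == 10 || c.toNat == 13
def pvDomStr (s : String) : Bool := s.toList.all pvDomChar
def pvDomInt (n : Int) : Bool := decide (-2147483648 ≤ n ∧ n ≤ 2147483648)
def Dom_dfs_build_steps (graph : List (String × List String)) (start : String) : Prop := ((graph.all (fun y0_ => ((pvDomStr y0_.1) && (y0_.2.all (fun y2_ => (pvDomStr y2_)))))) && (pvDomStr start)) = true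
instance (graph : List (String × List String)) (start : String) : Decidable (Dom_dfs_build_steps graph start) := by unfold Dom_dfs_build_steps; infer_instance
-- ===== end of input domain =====

-- B replaces A's recursive DFS with an iterative DFS over an explicit stack of (from, to)
-- edge tasks, reproducing A's exact visit and explanation order (objective: alternative).

-- shared state (visited set, steps, explanations) and the two mutations both Pythons perform
def pvVisit (st : List String × List String × List String) (n : String) :
    List String × List String × List String :=
  (PySem.Set.add st.1 n, st.2.1 ++ [n], st.2.2 ++ ["Visited " ++ n])

def pvEdge (st : List String × List String × List String) (frm nb : String) :
    List String × List String × List String :=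
  (st.1, st.2.1, st.2.2 ++ ["From " ++ frm ++ " → going to " ++ nb])

-- graph.get(node, []) on the dict argument (assoc list under the type convention)
def pvAdj (g : List (String × List String)) (n : String) : List String :=
  (PySem.Dict.mk g).getD n []

-- ===== PORT A =====
-- A's nested 'def dfs' plus its 'for neighbor' loop, as a mutual pair.  The Nat fuel only
-- makes the recursion total: it is threaded through and decremented once per actual visit,
-- and the returned bound 'p.2 ≤ f' serves termination; at the fuel used below (one unit
-- per visitable node, see pvFuelA) the 0-fuel branches are never reached.
mutual
def pvDfsA (g : List (String × List String)) (node : String)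
    (st : List String × List String × List String) (f : Nat) :
    {p : (List String × List String × List String) × Nat // p.2 ≤ f} :=
  if PySem.Set.contains st.1 node then ⟨(st, f), Nat.le_refl f⟩   -- 'if node not in visited'
  else
    match f with
    | 0 => ⟨(st, 0), Nat.le_refl 0⟩
    | f + 1 =>
      let r := pvLoopA g node (pvAdj g node) (pvVisit st node) f
      ⟨r.val, Nat.le_succ_of_le r.property⟩
termination_by (f, 0, 0)
decreasing_by simp_wf; exact Prod.Lex.left _ _ (Nat.lt_succ_self f)

def pvLoopA (g : List (String × List String)) (node : String) (nbs : List String)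
    (st : List String × List String × List String) (f : Nat) :
    {p : (List String × List String × List String) × Nat // p.2 ≤ f} :=
  match nbs with
  | [] => ⟨(st, f), Nat.le_refl f⟩
  | nb :: rest =>
    if PySem.Set.contains st.1 nb then pvLoopA g node rest st f
    else
      let r := pvDfsA g nb (pvEdge st node nb) f
      let r2 := pvLoopA g node rest r.val.1 r.val.2
      ⟨r2.val, Nat.le_trans r2.property r.property⟩
termination_by (f, 1, nbs.length + 1)
decreasing_by
  · simp_wf
    exact Prod.Lex.right f (Prod.Lex.right 1 (Nat.lt_succ_self _))
  · simp_wf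
    exact Prod.Lex.right f (Prod.Lex.left _ _ Nat.zero_lt_one)
  · simp_wf
    rcases Nat.lt_or_ge r.val.2 f with h | h
    · exact Prod.Lex.left _ _ h
    · have he : r.val.2 = f := Nat.le_antisymm r.property h
      rw [he]
      exact Prod.Lex.right f (Prod.Lex.right 1 (Nat.lt_succ_self _))
end

-- one fuel unit per visit; visits ≤ 1 + (total number of listed neighbors)
def pvFuelA (g : List (String × List String)) : Nat :=
  (g.map (fun p => p.2.length)).sum + 1

def dfs_build_steps (graph : List (String × List String)) (start : String) :
    List String × List String :=
  let r := pvDfsA graph start ([], [], []) (pvFuelA graph)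
  (r.val.1.2.1, r.val.1.2.2)

-- ===== PORT B =====
-- Source B's while loop over the explicit stack; the Lean list's HEAD is the stack's top
-- (Python pops from the end and extends with the reversed neighbor list, which is
-- prepending the neighbor tasks in order).  Fuel is decremented once per visit; the
-- 0-fuel branch is unreachable at the fuel used below.
def pvRunB (g : List (String × List String)) (f : Nat) (stk : List (String × String))
    (st : List String × List String × List String) :
    List String × List String × List String :=
  match stk with
  | [] => st
  | (frm, nb) :: rest =>
    if PySem.Set.contains st.1 nb then pvRunB g f rest st
    else
      match f with
      | 0 => pvRunB g 0 rest (pvEdge st frm nb)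
      | f + 1 =>
        pvRunB g f ((pvAdj g nb).map (fun m => (nb, m)) ++ rest)
          (pvVisit (pvEdge st frm nb) nb)
termination_by (f, stk.length)

def dfs_build_steps_alt (graph : List (String × List String)) (start : String) :
    List String × List String :=
  let st0 := pvVisit ([], [], []) start
  let st := pvRunB graph ((graph.map (fun p => p.2.length)).sum)
      ((pvAdj graph start).map (fun m => (start, m))) st0
  (st.2.1, st.2.2)

-- ===== PRECONDITION & SPEC =====
def Spec_dfs_build_steps (graph : List (String × List String)) (start : String) (out : List String × List String) : Prop := out = dfs_build_steps_alt graph start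
instance (graph : List (String × List String)) (start : String) (out : List String × List String) : Decidable (Spec_dfs_build_steps graph start out) := by unfold Spec_dfs_build_steps; infer_instance

-- ===== CLAIM (what is proved, stated in full; the proofs are below) =====
def Claim_equal_dfs_build_steps : Prop := ∀ (graph : List (String × List String)) (start : String), Dom_dfs_build_steps graph start → Spec_dfs_build_steps graph start (dfs_build_steps graph start)

-- ===== LEMMAS AND PROOFS =====

-- val-level unfolding equations for the three recursors (the subtype proofs would make
-- direct rewriting by the definitional equations dependently ill-typed)
lemma pvDfsA_zero (g : List (String × List String)) (node : String)
    (st : List String × List String × List String)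
    (hc : PySem.Set.contains st.1 node = false) :
    (pvDfsA g node st 0).val = (st, 0) := by
  rw [pvDfsA.eq_def]; simp at hc; simp [hc]

lemma pvDfsA_succ (g : List (String × List String)) (node : String)
    (st : List String × List String × List String) (f : Nat)
    (hc : PySem.Set.contains st.1 node = false) :
    (pvDfsA g node st (f + 1)).val
      = (pvLoopA g node (pvAdj g node) (pvVisit st node) f).val := by
  rw [pvDfsA.eq_def]; simp at hc; simp [hc]

lemma pvLoopA_nil (g : List (String × List String)) (node : String)
    (st : List String × List String × List String) (f : Nat) :
    (pvLoopA g node [] st f).val = (st, f) := by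
  rw [pvLoopA]

lemma pvLoopA_cons_skip (g : List (String × List String)) (node nb : String)
    (rest : List String) (st : List String × List String × List String) (f : Nat)
    (hc : PySem.Set.contains st.1 nb = true) :
    (pvLoopA g node (nb :: rest) st f).val = (pvLoopA g node rest st f).val := by
  rw [pvLoopA]; simp at hc; simp [hc]

lemma pvLoopA_cons_go (g : List (String × List String)) (node nb : String)
    (rest : List String) (st : List String × List String × List String) (f : Nat)
    (hc : PySem.Set.contains st.1 nb = false) :
    (pvLoopA g node (nb :: rest) st f).val
      = (pvLoopA g node rest (pvDfsA g nb (pvEdge st node nb) f).val.1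
          (pvDfsA g nb (pvEdge st node nb) f).val.2).val := by
  rw [pvLoopA]; simp at hc; simp [hc]

lemma pvRunB_nil (g : List (String × List String)) (f : Nat)
    (st : List String × List String × List String) :
    pvRunB g f [] st = st := by
  rw [pvRunB.eq_def]

lemma pvRunB_cons_skip (g : List (String × List String)) (f : Nat) (frm nb : String)
    (rest : List (String × String)) (st : List String × List String × List String)
    (hc : PySem.Set.contains st.1 nb = true) :
    pvRunB g f ((frm, nb) :: rest) st = pvRunB g f rest st := by
  rw [pvRunB.eq_def]; simp at hc; simp [hc]

lemma pvRunB_cons_zero (g : List (String × List String)) (frm nb : String)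
    (rest : List (String × String)) (st : List String × List String × List String)
    (hc : PySem.Set.contains st.1 nb = false) :
    pvRunB g 0 ((frm, nb) :: rest) st = pvRunB g 0 rest (pvEdge st frm nb) := by
  rw [pvRunB.eq_def]; simp at hc; simp [hc]

lemma pvRunB_cons_succ (g : List (String × List String)) (f : Nat) (frm nb : String)
    (rest : List (String × String)) (st : List String × List String × List String)
    (hc : PySem.Set.contains st.1 nb = false) :
    pvRunB g (f + 1) ((frm, nb) :: rest) st
      = pvRunB g f ((pvAdj g nb).map (fun m => (nb, m)) ++ rest)
          (pvVisit (pvEdge st frm nb) nb) := by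
  rw [pvRunB.eq_def]; simp at hc; simp [hc]

lemma pvEdge_fst (st : List String × List String × List String) (frm nb : String) :
    (pvEdge st frm nb).1 = st.1 := rfl

-- simulation: running B's stack machine on the edge tasks of 'nbs' (then a continuation
-- stack) equals running A's neighbor loop and continuing with its remaining fuel —
-- exact at EVERY fuel, because both machines consume one unit per visit and degenerate
-- identically when fuel runs out.
lemma pvMain (g : List (String × List String)) :
    ∀ (f : Nat) (node : String) (nbs : List String)
      (st : List String × List String × List String) (stk : List (String × String)),
      pvRunB g f (nbs.map (fun nb => (node, nb)) ++ stk) st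
        = pvRunB g (pvLoopA g node nbs st f).val.2 stk (pvLoopA g node nbs st f).val.1 := by
  intro f
  induction f using Nat.strong_induction_on with
  | _ f ihf =>
    intro node nbs
    induction nbs with
    | nil => intro st stk; rw [List.map_nil, List.nil_append, pvLoopA_nil]
    | cons nb rest ihr =>
      intro st stk
      rcases hc : PySem.Set.contains st.1 nb with _ | _
      · -- unvisited neighbor
        have hce : PySem.Set.contains (pvEdge st node nb).1 nb = false := by
          rw [pvEdge_fst]; exact hc
        match f with
        | 0 =>
          rw [List.map_cons, List.cons_append, pvRunB_cons_zero g node nb _ st hc,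
            pvLoopA_cons_go g node nb rest st 0 hc, pvDfsA_zero g nb _ hce]
          exact ihr _ stk
        | f + 1 =>
          rw [List.map_cons, List.cons_append, pvRunB_cons_succ g f node nb _ st hc,
            pvLoopA_cons_go g node nb rest st (f + 1) hc, pvDfsA_succ g nb _ f hce,
            ihf f (Nat.lt_succ_self f) nb (pvAdj g nb) _ _]
          exact ihf _ (Nat.lt_succ_of_le
            (pvLoopA g nb (pvAdj g nb) (pvVisit (pvEdge st node nb) nb) f).property)
            node rest _ stk
      · -- already visited: both sides skip
        rw [List.map_cons, List.cons_append, pvRunB_cons_skip g f node nb _ st hc,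
          pvLoopA_cons_skip g node nb rest st f hc]
        exact ihr st stk

theorem dfs_build_steps_spec : Claim_equal_dfs_build_steps := by
  intro g s _
  show dfs_build_steps g s = dfs_build_steps_alt g s
  unfold dfs_build_steps dfs_build_steps_alt pvFuelA
  have hc : PySem.Set.contains (([], [], []) :
      List String × List String × List String).1 s = false := by simp
  have h := pvMain g ((g.map (fun p => p.2.length)).sum) s (pvAdj g s)
    (pvVisit ([], [], []) s) []
  rw [List.append_nil] at h
  simp only [pvDfsA_succ g s ([], [], []) _ hc, h, pvRunB_nil]
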